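-- pv_equiv track=rewrite | github.com/mitsuo0114/competitive_programming | python/atcoder/Beginner096/C.py | solve
-- ===== SOURCE A (Python) =====
-- def solve(H, W, field):
--     for hi, row in enumerate(field):
--         for wi, cel in enumerate(row):
--             if cel != "#":
--                 continue
--             if any([field[hi + dh][dw + wi] == "#"
--                     for dh, dw in [(-1, 0), (1, 0), (0, -1), (0, 1)]
--                     if 0 <= hi + dh < H and 0 <= dw + wi < W]):
--                 pass
--             else:
--                 return "No"
--     return "Yes"
-- ===== SOURCE B (Python) =====
-- def solve(H, W, field):
--     hashes = {(hi, wi) for hi, row in enumerate(field)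
--               for wi, c in enumerate(row) if c == "#"}
--     supported = set()
--     for hi, wi in hashes:
--         if 0 <= hi < H and 0 <= wi < W:
--             supported.update(((hi - 1, wi), (hi + 1, wi), (hi, wi - 1), (hi, wi + 1)))
--     return "Yes" if hashes <= supported else "No"
-- ===== Notes on version B (the rewrite author's own statement) =====
-- stated objective: alternative
-- what changed: Per-cell 4-neighbor probing with an early return is replaced by building the set of '#' coordinates once, a scatter pass in which every in-bounds '#' cell marks its four neighbors as supported, and a final subset test.
-- outside the precondition, e.g. on solve(6, 5, ['.#.', '#....', '..#..', '#.###', '']): A returns 'No', B returns 'No'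
import Mathlib
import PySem

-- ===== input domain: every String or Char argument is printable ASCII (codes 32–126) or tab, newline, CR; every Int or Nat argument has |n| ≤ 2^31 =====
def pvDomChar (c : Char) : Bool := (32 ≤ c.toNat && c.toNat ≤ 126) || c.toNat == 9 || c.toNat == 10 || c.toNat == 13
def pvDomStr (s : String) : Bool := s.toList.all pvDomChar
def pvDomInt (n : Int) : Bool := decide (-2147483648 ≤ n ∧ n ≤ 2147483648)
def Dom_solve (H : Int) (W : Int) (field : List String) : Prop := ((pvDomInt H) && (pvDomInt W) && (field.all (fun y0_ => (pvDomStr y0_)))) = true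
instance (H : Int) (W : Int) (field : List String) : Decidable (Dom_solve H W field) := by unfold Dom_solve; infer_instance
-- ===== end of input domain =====

-- B replaces per-cell neighbor probing by one '#'-coordinate set plus a scatter pass (each in-bounds '#' marks its neighbors supported) and a subset test ("alternative", same cost).

-- ===== PORT A =====
-- field[hi+dh][dw+wi] == "#" (none = IndexError, which only happens outside Pre_)
def pvAt (field : List String) (i j : Int) : Bool :=
  ((PySem.List.pyGet? field i).bind (fun r => PySem.Str.pyGet? r j)) == some '#'

-- any([...]) over the guarded 4-neighbor comprehension
def pvNeighborHit (H : Int) (W : Int) (field : List String) (hi : Int) (wi : Int) : Bool :=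
  (([((-1 : Int), (0 : Int)), (1, 0), (0, -1), (0, 1)].filter
      (fun d => decide (0 ≤ hi + d.1 ∧ hi + d.1 < H ∧ 0 ≤ d.2 + wi ∧ d.2 + wi < W))).map
    (fun d => pvAt field (hi + d.1) (d.2 + wi))).any (fun b => b)

-- inner 'for wi, cel in enumerate(row)' with the early 'return "No"'
def pvRowLoop (H : Int) (W : Int) (field : List String) (hi : Int) : List (Int × Char) → Option String
  | [] => none
  | (wi, cel) :: rest =>
      if cel ≠ '#' then pvRowLoop H W field hi rest
      else if pvNeighborHit H W field hi wi then pvRowLoop H W field hi rest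
      else some "No"

-- outer 'for hi, row in enumerate(field)'
def pvFieldLoop (H : Int) (W : Int) (field : List String) : List (Int × String) → String
  | [] => "Yes"
  | (hi, row) :: rest =>
      match pvRowLoop H W field hi (PySem.List.enumerate row.toList) with
      | some s => s
      | none => pvFieldLoop H W field rest

def solve (H : Int) (W : Int) (field : List String) : String :=
  pvFieldLoop H W field (PySem.List.enumerate field)

-- ===== PORT B =====
-- the set comprehension: coordinates of every '#' cell
def pvHashes (field : List String) : PySem.Set (Int × Int) :=
  PySem.Set.ofList ((PySem.List.enumerate field).flatMap (fun p =>
    (PySem.List.enumerate p.2.toList).filterMap (fun q =>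
      if q.2 == '#' then some (p.1, q.1) else none)))

-- scatter pass: every in-bounds '#' cell marks its four neighbors as supported
def pvSupported (H : Int) (W : Int) (field : List String) : PySem.Set (Int × Int) :=
  (pvHashes field).foldl (fun s p =>
    if 0 ≤ p.1 ∧ p.1 < H ∧ 0 ≤ p.2 ∧ p.2 < W then
      PySem.Set.update s [(p.1 - 1, p.2), (p.1 + 1, p.2), (p.1, p.2 - 1), (p.1, p.2 + 1)]
    else s) PySem.Set.empty

def solve_alt (H : Int) (W : Int) (field : List String) : String :=
  if PySem.Set.issubset (pvHashes field) (pvSupported H W field) then "Yes" else "No"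

-- ===== PRECONDITION & SPEC =====
-- Pre_ excludes inputs on which some guarded neighbor index of a '#' cell falls outside the ragged
-- row list, where A's field[hi+dh][dw+wi] raises IndexError (on a few such inputs A still returns
-- "No" from an earlier isolated cell; B returns the same "No" there).
def Pre_solve (H : Int) (W : Int) (field : List String) : Prop :=
  ((List.range field.length).all (fun k =>
    (List.range (field.getD k "").toList.length).all (fun j =>
      !((field.getD k "").toList.getD j ' ' == '#') ||
      ([((-1 : Int), (0 : Int)), (1, 0), (0, -1), (0, 1)].all (fun d =>
        !(decide (0 ≤ (k : Int) + d.1) && decide ((k : Int) + d.1 < H) &&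
          decide (0 ≤ d.2 + (j : Int)) && decide (d.2 + (j : Int) < W)) ||
        (decide ((k : Int) + d.1 < (field.length : Int)) &&
         decide (d.2 + (j : Int) < ((field.getD ((k : Int) + d.1).toNat "").toList.length : Int)))))))) = true
instance (H : Int) (W : Int) (field : List String) : Decidable (Pre_solve H W field) := by
  unfold Pre_solve; infer_instance

def pvWitness_solve : Int × Int × List String := (2, 2, ["#.", "#."])

def Spec_solve (H : Int) (W : Int) (field : List String) (out : String) : Prop := out = solve_alt H W field
instance (H : Int) (W : Int) (field : List String) (out : String) : Decidable (Spec_solve H W field out) := by unfold Spec_solve; infer_instance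

-- ===== CLAIM (what is proved, stated in full; the proofs are below) =====
def Claim_equal_solve : Prop := ∀ (H : Int) (W : Int) (field : List String), Dom_solve H W field → Pre_solve H W field → Spec_solve H W field (solve H W field)

-- ===== LEMMAS AND PROOFS =====

-- boolean "some cell of the grid is '#' and has no guarded '#' neighbor", in A's traversal terms
def pvBadA (H : Int) (W : Int) (field : List String) : Bool :=
  (PySem.List.enumerate field).any (fun p =>
    (PySem.List.enumerate p.2.toList).any (fun q =>
      q.2 == '#' && !pvNeighborHit H W field p.1 q.1))

theorem pv_rowLoop_eq (H W : Int) (field : List String) (hi : Int) (cells : List (Int × Char)) :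
    pvRowLoop H W field hi cells =
      (if cells.any (fun q => q.2 == '#' && !pvNeighborHit H W field hi q.1) then some "No" else none) := by
  induction cells with
  | nil => simp [pvRowLoop]
  | cons q rest ih =>
      obtain ⟨wi, cel⟩ := q
      rw [pvRowLoop, List.any_cons]
      by_cases hc : cel = '#'
      · subst hc
        by_cases hn : pvNeighborHit H W field hi wi = true
        · rw [if_neg (by simp), if_pos hn, hn]; simpa using ih
        · simp only [Bool.not_eq_true] at hn
          rw [if_neg (by simp), hn]
          simp
      · rw [if_pos hc]
        have : (cel == '#') = false := by simp [hc]
        rw [this]; simpa using ih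

theorem pv_fieldLoop_eq (H W : Int) (field : List String) (l : List (Int × String)) :
    pvFieldLoop H W field l =
      (if l.any (fun p => (PySem.List.enumerate p.2.toList).any (fun q =>
          q.2 == '#' && !pvNeighborHit H W field p.1 q.1)) then "No" else "Yes") := by
  induction l with
  | nil => simp [pvFieldLoop]
  | cons p rest ih =>
      obtain ⟨hi, row⟩ := p
      rw [pvFieldLoop, pv_rowLoop_eq, List.any_cons]
      by_cases hb : (PySem.List.enumerate row.toList).any (fun q =>
          q.2 == '#' && !pvNeighborHit H W field hi q.1) = true
      · rw [hb]; simp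
      · simp only [Bool.not_eq_true] at hb
        rw [hb, Bool.false_or]
        simpa using ih

theorem pv_solve_eq (H W : Int) (field : List String) :
    solve H W field = (if pvBadA H W field then "No" else "Yes") := by
  simp [solve, pv_fieldLoop_eq, pvBadA]

theorem pv_mem_foldl {ι : Type} (f : List (Int × Int) → ι → List (Int × Int)) (Q : ι → Int × Int → Prop)
    (hf : ∀ s i p, p ∈ f s i ↔ p ∈ s ∨ Q i p) :
    ∀ (l : List ι) (s : List (Int × Int)) (p : Int × Int),
      p ∈ l.foldl f s ↔ p ∈ s ∨ ∃ i ∈ l, Q i p := by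
  intro l
  induction l with
  | nil => simp
  | cons i rest ih =>
      intro s p
      simp only [List.foldl_cons, ih, hf, List.mem_cons]
      constructor
      · rintro ((h | h) | ⟨j, hj, hQ⟩)
        · exact Or.inl h
        · exact Or.inr ⟨i, Or.inl rfl, h⟩
        · exact Or.inr ⟨j, Or.inr hj, hQ⟩
      · rintro (h | ⟨j, (rfl | hj), hQ⟩)
        · exact Or.inl (Or.inl h)
        · exact Or.inl (Or.inr hQ)
        · exact Or.inr ⟨j, hj, hQ⟩

theorem pv_neighborHit_iff (H W : Int) (field : List String) (hi wi : Int) :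
    pvNeighborHit H W field hi wi = true ↔
      ((0 ≤ hi - 1 ∧ hi - 1 < H ∧ 0 ≤ wi ∧ wi < W) ∧ pvAt field (hi - 1) wi = true) ∨
      ((0 ≤ hi + 1 ∧ hi + 1 < H ∧ 0 ≤ wi ∧ wi < W) ∧ pvAt field (hi + 1) wi = true) ∨
      ((0 ≤ hi ∧ hi < H ∧ 0 ≤ wi - 1 ∧ wi - 1 < W) ∧ pvAt field hi (wi - 1) = true) ∨
      ((0 ≤ hi ∧ hi < H ∧ 0 ≤ wi + 1 ∧ wi + 1 < W) ∧ pvAt field hi (wi + 1) = true) := by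
  have e1 : hi + -1 = hi - 1 := by ring
  have e2 : (-1) + wi = wi - 1 := by ring
  have e3 : (0:Int) + wi = wi := by ring
  have e4 : (1:Int) + wi = wi + 1 := by ring
  simp only [pvNeighborHit, List.any_eq_true, List.mem_map, List.mem_filter,
    List.mem_cons, List.not_mem_nil, or_false, decide_eq_true_eq]
  constructor
  · rintro ⟨b, ⟨d, ⟨hd, hg⟩, rfl⟩, hb⟩
    rcases hd with rfl | rfl | rfl | rfl
    · simp only [e1, e3] at hg hb; exact Or.inl ⟨hg, hb⟩
    · simp only [e3] at hg hb; exact Or.inr (Or.inl ⟨hg, hb⟩)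
    · simp only [e2, add_zero] at hg hb; exact Or.inr (Or.inr (Or.inl ⟨hg, hb⟩))
    · simp only [e4, add_zero] at hg hb; exact Or.inr (Or.inr (Or.inr ⟨hg, hb⟩))
  · rintro (⟨hg, h⟩ | ⟨hg, h⟩ | ⟨hg, h⟩ | ⟨hg, h⟩)
    · exact ⟨_, ⟨((-1),0), ⟨Or.inl rfl, by simp only [e1, e3]; omega⟩, rfl⟩,
        by simpa [e1, e3] using h⟩
    · exact ⟨_, ⟨(1,0), ⟨Or.inr (Or.inl rfl), by simp only [e3]; omega⟩, rfl⟩,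
        by simpa [e3] using h⟩
    · exact ⟨_, ⟨(0,(-1)), ⟨Or.inr (Or.inr (Or.inl rfl)), by simp only [e2, add_zero]; omega⟩, rfl⟩,
        by simpa [e2, add_zero] using h⟩
    · exact ⟨_, ⟨(0,1), ⟨Or.inr (Or.inr (Or.inr rfl)), by simp only [e4, add_zero]; omega⟩, rfl⟩,
        by simpa [e4, add_zero] using h⟩

theorem pv_mem_hashes (field : List String) (p : Int × Int) :
    p ∈ pvHashes field ↔ ∃ (k : Nat) (hk : k < field.length) (j : Nat)
      (hj : j < field[k].toList.length),
      field[k].toList[j] = '#' ∧ p = ((k : Int), (j : Int)) := by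
  rw [pvHashes, PySem.Set.mem_ofList, List.mem_flatMap]
  constructor
  · rintro ⟨a, ha, hmem⟩
    rw [PySem.List.mem_enumerate_iff] at ha
    obtain ⟨k, hk, rfl⟩ := ha
    rw [List.mem_filterMap] at hmem
    obtain ⟨q, hq, hsome⟩ := hmem
    rw [PySem.List.mem_enumerate_iff] at hq
    obtain ⟨j, hj, rfl⟩ := hq
    simp only [zero_add] at hsome ⊢
    by_cases hc : field[k].toList[j] = '#'
    · rw [if_pos (by simp [hc])] at hsome
      exact ⟨k, hk, j, hj, hc, (Option.some_inj.mp hsome).symm⟩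
    · rw [if_neg (by simp [hc])] at hsome
      simp at hsome
  · rintro ⟨k, hk, j, hj, hc, rfl⟩
    refine ⟨((k : Int), field[k]), ?_, ?_⟩
    · rw [PySem.List.mem_enumerate_iff]; exact ⟨k, hk, by simp⟩
    · rw [List.mem_filterMap]
      refine ⟨((j : Int), field[k].toList[j]), ?_, ?_⟩
      · rw [PySem.List.mem_enumerate_iff]; exact ⟨j, hj, by simp⟩
      · rw [if_pos (by simp [hc])]

theorem pv_at_cast (field : List String) (k j : Nat) :
    pvAt field (k : Int) (j : Int) = true ↔
      ∃ (hk : k < field.length) (hj : j < field[k].toList.length), field[k].toList[j] = '#' := by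
  simp [pvAt, PySem.List.pyGet?_natCast, Option.bind_eq_some_iff, List.getElem?_eq_some_iff]

theorem pv_at_mem_hashes (field : List String) (a b : Int) (ha : 0 ≤ a) (hb : 0 ≤ b) :
    pvAt field a b = true ↔ (a, b) ∈ pvHashes field := by
  obtain ⟨k, rfl⟩ : ∃ k : Nat, a = (k : Int) := ⟨a.toNat, by omega⟩
  obtain ⟨j, rfl⟩ : ∃ j : Nat, b = (j : Int) := ⟨b.toNat, by omega⟩
  rw [pv_at_cast, pv_mem_hashes]
  constructor
  · rintro ⟨hk, hj, hc⟩; exact ⟨k, hk, j, hj, hc, rfl⟩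
  · rintro ⟨k', hk, j', hj, hc, hp⟩
    obtain ⟨e1, e2⟩ := Prod.mk.injEq .. ▸ hp
    have : k = k' := by exact_mod_cast e1
    subst this
    have : j = j' := by exact_mod_cast e2
    subst this
    exact ⟨hk, hj, hc⟩

theorem pv_mem_supported (H W : Int) (field : List String) (p : Int × Int) :
    p ∈ pvSupported H W field ↔ ∃ q ∈ pvHashes field,
      (0 ≤ q.1 ∧ q.1 < H ∧ 0 ≤ q.2 ∧ q.2 < W) ∧
      p ∈ [(q.1 - 1, q.2), (q.1 + 1, q.2), (q.1, q.2 - 1), (q.1, q.2 + 1)] := by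
  rw [pvSupported,
    pv_mem_foldl _ (fun q p => (0 ≤ q.1 ∧ q.1 < H ∧ 0 ≤ q.2 ∧ q.2 < W) ∧
        p ∈ [(q.1 - 1, q.2), (q.1 + 1, q.2), (q.1, q.2 - 1), (q.1, q.2 + 1)])
      (fun s q p => by
        split_ifs with hg
        · rw [PySem.Set.mem_update]; tauto
        · tauto)]
  simp [PySem.Set.empty]

theorem pv_supported_iff_NH (H W : Int) (field : List String) (hi wi : Int) :
    (hi, wi) ∈ pvSupported H W field ↔ pvNeighborHit H W field hi wi = true := by
  rw [pv_mem_supported, pv_neighborHit_iff]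
  constructor
  · rintro ⟨⟨qh, qw⟩, hq, ⟨g1, g2, g3, g4⟩, hmem⟩
    have hat : pvAt field qh qw = true := (pv_at_mem_hashes field qh qw g1 g3).mpr hq
    simp only [List.mem_cons, List.not_mem_nil, or_false, Prod.mk.injEq] at hmem
    rcases hmem with ⟨e1, e2⟩ | ⟨e1, e2⟩ | ⟨e1, e2⟩ | ⟨e1, e2⟩
    · -- p = (qh-1, qw): q is below p
      have : qh = hi + 1 := by omega
      subst this; subst e2
      exact Or.inr (Or.inl ⟨⟨by omega, by omega, by omega, by omega⟩, hat⟩)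
    · -- p = (qh+1, qw): q is above p
      have : qh = hi - 1 := by omega
      subst this; subst e2
      exact Or.inl ⟨⟨by omega, by omega, by omega, by omega⟩, hat⟩
    · -- p = (qh, qw-1): q is right of p
      have : qw = wi + 1 := by omega
      subst this; subst e1
      exact Or.inr (Or.inr (Or.inr ⟨⟨by omega, by omega, by omega, by omega⟩, hat⟩))
    · -- p = (qh, qw+1): q is left of p
      have : qw = wi - 1 := by omega
      subst this; subst e1
      exact Or.inr (Or.inr (Or.inl ⟨⟨by omega, by omega, by omega, by omega⟩, hat⟩))
  · rintro (⟨⟨g1, g2, g3, g4⟩, h⟩ | ⟨⟨g1, g2, g3, g4⟩, h⟩ | ⟨⟨g1, g2, g3, g4⟩, h⟩ | ⟨⟨g1, g2, g3, g4⟩, h⟩)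
    · refine ⟨(hi - 1, wi), (pv_at_mem_hashes field _ _ g1 g3).mp h, ⟨g1, g2, g3, g4⟩, ?_⟩
      simp [show hi - 1 + 1 = hi from by ring]
    · refine ⟨(hi + 1, wi), (pv_at_mem_hashes field _ _ g1 g3).mp h, ⟨g1, g2, g3, g4⟩, ?_⟩
      simp [show hi + 1 - 1 = hi from by ring]
    · refine ⟨(hi, wi - 1), (pv_at_mem_hashes field _ _ g1 g3).mp h, ⟨g1, g2, g3, g4⟩, ?_⟩
      simp [show wi - 1 + 1 = wi from by ring]
    · refine ⟨(hi, wi + 1), (pv_at_mem_hashes field _ _ g1 g3).mp h, ⟨g1, g2, g3, g4⟩, ?_⟩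
      simp [show wi + 1 - 1 = wi from by ring]

theorem pv_badA_iff (H W : Int) (field : List String) :
    pvBadA H W field = true ↔
      ∃ p ∈ pvHashes field, pvNeighborHit H W field p.1 p.2 = false := by
  simp only [pvBadA, List.any_eq_true]
  constructor
  · rintro ⟨a, ha, q, hq, hb⟩
    rw [PySem.List.mem_enumerate_iff] at ha
    obtain ⟨k, hk, rfl⟩ := ha
    rw [PySem.List.mem_enumerate_iff] at hq
    obtain ⟨j, hj, rfl⟩ := hq
    simp only [zero_add] at hb
    rw [Bool.and_eq_true, Bool.not_eq_true'] at hb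
    obtain ⟨hcel, hnh⟩ := hb
    refine ⟨((k : Int), (j : Int)), ?_, hnh⟩
    rw [pv_mem_hashes]
    exact ⟨k, hk, j, hj, by simpa using hcel, rfl⟩
  · rintro ⟨p, hp, hnh⟩
    rw [pv_mem_hashes] at hp
    obtain ⟨k, hk, j, hj, hc, rfl⟩ := hp
    refine ⟨((k : Int), field[k]), ?_, ((j : Int), field[k].toList[j]), ?_, ?_⟩
    · rw [PySem.List.mem_enumerate_iff]; exact ⟨k, hk, by simp⟩
    · rw [PySem.List.mem_enumerate_iff]; exact ⟨j, hj, by simp⟩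
    · rw [Bool.and_eq_true, Bool.not_eq_true']
      exact ⟨by simpa using hc, hnh⟩

-- ===== VERDICT (by name: the statement is the Claim_ definition above) =====
theorem solve_spec : Claim_equal_solve := by
  intro H W field _ _
  unfold Spec_solve solve_alt
  rw [pv_solve_eq]
  by_cases hb : pvBadA H W field = true
  · rw [if_pos hb]
    obtain ⟨p, hp, hnh⟩ := (pv_badA_iff H W field).mp hb
    rw [if_neg ?_]
    intro hsub
    rw [PySem.Set.issubset_iff] at hsub
    have hmem := hsub p hp
    rw [show p = (p.1, p.2) from rfl, pv_supported_iff_NH H W field p.1 p.2] at hmem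
    rw [hnh] at hmem
    exact Bool.false_ne_true hmem
  · simp only [Bool.not_eq_true] at hb
    rw [hb, if_neg (by simp)]
    rw [if_pos ?_]
    rw [PySem.Set.issubset_iff]
    intro p hp
    rw [show p = (p.1, p.2) from rfl, pv_supported_iff_NH H W field p.1 p.2]
    by_contra hnot
    simp only [Bool.not_eq_true] at hnot
    have : pvBadA H W field = true := (pv_badA_iff H W field).mpr ⟨p, hp, hnot⟩
    rw [hb] at this
    exact Bool.false_ne_true this
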